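-- pv_equiv track=rewrite | github.com/suyash012/pdf_intellect | backend/app/ai_service.py | format_yes_no_response
-- ===== SOURCE A (Python) =====
-- def format_yes_no_response(sentences, entities):
--     """Format response to a yes/no question"""
--     # Look for yes/no indicators
--     yes_indicators = ["yes", "correct", "true", "right", "indeed", "agree", "confirm"]
--     no_indicators = ["no", "incorrect", "false", "wrong", "disagree", "deny", "refute"]
--
--     yes_count = 0
--     no_count = 0
--
--     for sentence in sentences:
--         sentence_lower = sentence.lower()
--
--         # Count yes/no indicators
--         for indicator in yes_indicators:
--             if f" {indicator} " in f" {sentence_lower} ":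
--                 yes_count += 1
--
--         for indicator in no_indicators:
--             if f" {indicator} " in f" {sentence_lower} ":
--                 no_count += 1
--
--     # Determine response based on indicator counts
--     if yes_count > no_count:
--         return f"Yes. According to the document: {sentences[0]}"
--     elif no_count > yes_count:
--         return f"No. According to the document: {sentences[0]}"
--     else:
--         return f"Based on the document: {sentences[0]}"
-- ===== SOURCE B (Python) =====
-- YES_SET = {"yes", "correct", "true", "right", "indeed", "agree", "confirm"}
-- NO_SET = {"no", "incorrect", "false", "wrong", "disagree", "deny", "refute"}
--
-- def format_yes_no_response(sentences, entities):
--     """Format response to a yes/no question"""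
--     yes_count = 0
--     no_count = 0
--     for sentence in sentences:
--         tokens = set(sentence.lower().split(' '))
--         yes_count += len(YES_SET & tokens)
--         no_count += len(NO_SET & tokens)
--     if yes_count > no_count:
--         return f"Yes. According to the document: {sentences[0]}"
--     elif no_count > yes_count:
--         return f"No. According to the document: {sentences[0]}"
--     else:
--         return f"Based on the document: {sentences[0]}"
-- ===== Notes on version B (the rewrite author's own statement) =====
-- stated objective: faster
-- what changed: B tokenizes each sentence once with split(' ') into a token set and adds the sizes of its intersections with the fixed yes/no indicator sets, replacing A's 14 padded-substring scans per sentence.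
import Mathlib
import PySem

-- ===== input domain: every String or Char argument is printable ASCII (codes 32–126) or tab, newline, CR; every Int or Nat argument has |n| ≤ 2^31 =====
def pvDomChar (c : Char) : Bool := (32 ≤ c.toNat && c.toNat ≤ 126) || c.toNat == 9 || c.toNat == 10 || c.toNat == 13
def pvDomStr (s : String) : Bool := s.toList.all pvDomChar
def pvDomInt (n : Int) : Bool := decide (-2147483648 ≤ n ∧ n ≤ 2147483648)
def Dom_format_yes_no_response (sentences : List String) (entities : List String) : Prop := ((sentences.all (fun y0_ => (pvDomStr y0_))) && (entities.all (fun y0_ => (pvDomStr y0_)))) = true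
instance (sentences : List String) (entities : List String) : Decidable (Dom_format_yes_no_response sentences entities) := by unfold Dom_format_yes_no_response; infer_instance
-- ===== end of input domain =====

-- B tokenizes each sentence once with split(' ') and intersects the token set against the two
-- indicator sets, instead of A's 14 padded-substring scans per sentence (objective: alternative).

-- the yes/no indicator word lists (shared literals of both sources)
def pvYesInds : List (List Char) :=
  [['y','e','s'], ['c','o','r','r','e','c','t'], ['t','r','u','e'], ['r','i','g','h','t'],
   ['i','n','d','e','e','d'], ['a','g','r','e','e'], ['c','o','n','f','i','r','m']]
def pvNoInds : List (List Char) :=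
  [['n','o'], ['i','n','c','o','r','r','e','c','t'], ['f','a','l','s','e'], ['w','r','o','n','g'],
   ['d','i','s','a','g','r','e','e'], ['d','e','n','y'], ['r','e','f','u','t','e']]

-- ===== PORT A =====
def format_yes_no_response (sentences : List String) (entities : List String) : String :=
  let counts : Int × Int := sentences.foldl (fun (st : Int × Int) sentence =>
    let sentence_lower := PySem.Chars.lower sentence.toList
    let y := pvYesInds.foldl (fun n indicator =>
      if PySem.Chars.isIn (' ' :: (indicator ++ [' '])) (' ' :: (sentence_lower ++ [' '])) then n + 1 else n) st.1
    let no := pvNoInds.foldl (fun n indicator =>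
      if PySem.Chars.isIn (' ' :: (indicator ++ [' '])) (' ' :: (sentence_lower ++ [' '])) then n + 1 else n) st.2
    (y, no)) (0, 0)
  if counts.1 > counts.2 then
    String.ofList ("Yes. According to the document: ".toList ++ (PySem.List.pyGetD sentences 0 "").toList)
  else if counts.2 > counts.1 then
    String.ofList ("No. According to the document: ".toList ++ (PySem.List.pyGetD sentences 0 "").toList)
  else
    String.ofList ("Based on the document: ".toList ++ (PySem.List.pyGetD sentences 0 "").toList)

-- ===== PORT B =====
def pvYesSet : PySem.Set (List Char) := PySem.Set.ofList pvYesInds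
def pvNoSet : PySem.Set (List Char) := PySem.Set.ofList pvNoInds

def format_yes_no_response_alt (sentences : List String) (entities : List String) : String :=
  let counts : Int × Int := sentences.foldl (fun (st : Int × Int) sentence =>
    let tokens : PySem.Set (List Char) :=
      PySem.Set.ofList (PySem.Chars.splitOn (PySem.Chars.lower sentence.toList) [' '])
    (st.1 + PySem.Set.len (PySem.Set.inter pvYesSet tokens),
     st.2 + PySem.Set.len (PySem.Set.inter pvNoSet tokens))) (0, 0)
  if counts.1 > counts.2 then
    String.ofList ("Yes. According to the document: ".toList ++ (PySem.List.pyGetD sentences 0 "").toList)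
  else if counts.2 > counts.1 then
    String.ofList ("No. According to the document: ".toList ++ (PySem.List.pyGetD sentences 0 "").toList)
  else
    String.ofList ("Based on the document: ".toList ++ (PySem.List.pyGetD sentences 0 "").toList)

-- ===== PRECONDITION & SPEC =====
-- Pre_ excludes only the empty sentence list, on which A (and B alike) raises IndexError at sentences[0].
def Pre_format_yes_no_response (sentences : List String) (entities : List String) : Prop := sentences ≠ []
instance (sentences : List String) (entities : List String) : Decidable (Pre_format_yes_no_response sentences entities) := by unfold Pre_format_yes_no_response; infer_instance
def pvWitness_format_yes_no_response : List String × List String := (["Yes it is true"], [])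

def Spec_format_yes_no_response (sentences : List String) (entities : List String) (out : String) : Prop := out = format_yes_no_response_alt sentences entities
instance (sentences : List String) (entities : List String) (out : String) : Decidable (Spec_format_yes_no_response sentences entities out) := by unfold Spec_format_yes_no_response; infer_instance

-- ===== CLAIM (what is proved, stated in full; the proofs are below) =====
def Claim_equal_format_yes_no_response : Prop := ∀ (sentences : List String) (entities : List String), Dom_format_yes_no_response sentences entities → Pre_format_yes_no_response sentences entities → Spec_format_yes_no_response sentences entities (format_yes_no_response sentences entities)

-- ===== LEMMAS AND PROOFS =====

-- chunks of a list between the space characters (the value of s.split(' '), computed front-to-back):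
-- pvChunksAux l = (first chunk of l, remaining chunks of l)
def pvChunksAux : List Char → List Char × List (List Char)
  | [] => ([], [])
  | c :: rest =>
      let p := pvChunksAux rest
      if c = ' ' then ([], p.1 :: p.2) else (c :: p.1, p.2)

lemma pvChunksAux_nil : pvChunksAux [] = ([], []) := rfl
lemma pvChunksAux_space (rest : List Char) :
    pvChunksAux (' ' :: rest) = ([], (pvChunksAux rest).1 :: (pvChunksAux rest).2) := by
  simp [pvChunksAux]
lemma pvChunksAux_char (c : Char) (rest : List Char) (hc : c ≠ ' ') :
    pvChunksAux (c :: rest) = (c :: (pvChunksAux rest).1, (pvChunksAux rest).2) := by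
  simp [pvChunksAux, hc]

-- fuel-generalised characterisation of PySem.Chars.splitOn.go for separator " "
lemma pv_go_spec (fuel : Nat) (l cur : List Char) (acc : List (List Char)) (h : l.length < fuel) :
    PySem.Chars.splitOn.go [' '] fuel l cur acc
      = acc.reverse ++ (cur.reverse ++ (pvChunksAux l).1) :: (pvChunksAux l).2 := by
  induction fuel generalizing l cur acc with
  | zero => omega
  | succ fuel ih =>
    cases l with
    | nil => simp [PySem.Chars.splitOn.go, pvChunksAux]
    | cons c rest =>
      rw [PySem.Chars.splitOn.go]
      by_cases hc : c = ' '
      · subst hc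
        simp only [List.isPrefixOf, BEq.rfl, Bool.true_and, if_pos]
        rw [ih _ _ _ (by simpa using Nat.lt_of_succ_lt_succ h)]
        simp [pvChunksAux]
      · have hp : List.isPrefixOf [' '] (c :: rest) = false := by
          simp [List.isPrefixOf]; exact fun hc' => absurd hc'.symm hc
        rw [if_neg (by simp [hp])]
        rw [ih _ _ _ (by simpa using Nat.lt_of_succ_lt_succ h)]
        simp [pvChunksAux, hc]

lemma pv_splitOn_eq_chunks (l : List Char) :
    PySem.Chars.splitOn l [' '] = (pvChunksAux l).1 :: (pvChunksAux l).2 := by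
  unfold PySem.Chars.splitOn
  rw [pv_go_spec _ _ _ _ (by omega)]
  simp

-- "t ⌴" is a prefix of "l ⌴" exactly when t is the first chunk of l
lemma pv_prefix_iff (t l : List Char) (ht : ' ' ∉ t) :
    (t ++ [' ']) <+: (l ++ [' ']) ↔ t = (pvChunksAux l).1 := by
  induction l generalizing t with
  | nil =>
    cases t with
    | nil => simp [pvChunksAux_nil]
    | cons a t' =>
      rw [pvChunksAux_nil]
      constructor
      · intro hp
        have := hp.length_le
        simp at this
      · intro h; simp at h
  | cons c rest ih =>
    cases t with
    | nil =>
      simp only [List.nil_append]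
      by_cases hc : c = ' '
      · subst hc; rw [pvChunksAux_space]; simp [List.cons_prefix_cons]
      · rw [pvChunksAux_char c rest hc]
        simp [List.cons_prefix_cons, Ne.symm hc]
    | cons a t' =>
      have ha : a ≠ ' ' := fun h => ht (h ▸ List.mem_cons_self)
      have ht' : ' ' ∉ t' := fun h => ht (List.mem_cons_of_mem _ h)
      rw [List.cons_append, List.cons_append, List.cons_prefix_cons]
      by_cases hc : c = ' '
      · subst hc; rw [pvChunksAux_space]; simp [ha]
      · rw [pvChunksAux_char c rest hc, ih t' ht']
        constructor
        · rintro ⟨rfl, rfl⟩; rfl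
        · intro h; exact ⟨by injection h, by injection h⟩

-- "⌴t ⌴" is an infix of "l ⌴" exactly when t is a non-first chunk of l
lemma pv_infix_iff (t l : List Char) (hne : t ≠ []) (ht : ' ' ∉ t) :
    (' ' :: (t ++ [' '])) <:+: (l ++ [' ']) ↔ t ∈ (pvChunksAux l).2 := by
  induction l with
  | nil =>
    rw [pvChunksAux_nil]
    simp only [List.nil_append, List.not_mem_nil, iff_false]
    intro hi
    have := hi.length_le
    simp at this
  | cons c rest ih =>
    rw [List.cons_append, List.infix_cons_iff, List.cons_prefix_cons]
    by_cases hc : c = ' '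
    · subst hc
      rw [pvChunksAux_space, List.mem_cons, ih]
      constructor
      · rintro (⟨-, hp⟩ | hi)
        · exact Or.inl ((pv_prefix_iff t rest ht).1 hp)
        · exact Or.inr hi
      · rintro (rfl | hi)
        · exact Or.inl ⟨rfl, (pv_prefix_iff _ rest ht).2 rfl⟩
        · exact Or.inr hi
    · rw [pvChunksAux_char c rest hc, ih]
      constructor
      · rintro (⟨h, -⟩ | hi)
        · exact absurd h.symm hc
        · exact hi
      · exact Or.inr

-- the key fact: A's padded-substring test is membership in the split(' ') tokens
lemma pv_key (t l : List Char) (hne : t ≠ []) (ht : ' ' ∉ t) :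
    PySem.Chars.isIn (' ' :: (t ++ [' '])) (' ' :: (l ++ [' '])) = true
      ↔ t ∈ PySem.Chars.splitOn l [' '] := by
  rw [PySem.Chars.isIn_iff_infix, pv_splitOn_eq_chunks, List.mem_cons,
    List.infix_cons_iff, List.cons_prefix_cons]
  rw [pv_prefix_iff t l ht, pv_infix_iff t l hne ht]
  constructor
  · rintro (⟨-, h⟩ | h)
    · exact Or.inl h
    · exact Or.inr h
  · rintro (h | h)
    · exact Or.inl ⟨rfl, h⟩
    · exact Or.inr h

-- one indicator-counting inner loop of A equals one set-intersection size of B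
lemma pv_count_eq (inds : List (List Char)) (hn : inds.Nodup)
    (hok : ∀ t ∈ inds, t ≠ [] ∧ ' ' ∉ t) (low : List Char) (n : Int) :
    inds.foldl (fun n indicator =>
      if PySem.Chars.isIn (' ' :: (indicator ++ [' '])) (' ' :: (low ++ [' '])) then n + 1 else n) n
    = n + PySem.Set.len (PySem.Set.inter (PySem.Set.ofList inds)
        (PySem.Set.ofList (PySem.Chars.splitOn low [' ']))) := by
  rw [PySem.List.foldl_count_if]
  congr 1
  rw [PySem.Set.ofList_eq_self_of_nodup inds hn]
  unfold PySem.Set.inter PySem.Set.len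
  rw [← List.countP_eq_length_filter]
  congr 1
  exact_mod_cast List.countP_congr (fun t htm => by
    rw [pv_key t low (hok t htm).1 (hok t htm).2, PySem.Set.contains_iff,
      PySem.Set.mem_ofList])

-- one sentence step of A's loop equals one sentence step of B's loop
lemma pv_step_eq (st : Int × Int) (sentence : String) :
    (let sentence_lower := PySem.Chars.lower sentence.toList
     let y := pvYesInds.foldl (fun n indicator =>
       if PySem.Chars.isIn (' ' :: (indicator ++ [' '])) (' ' :: (sentence_lower ++ [' '])) then n + 1 else n) st.1
     let no := pvNoInds.foldl (fun n indicator =>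
       if PySem.Chars.isIn (' ' :: (indicator ++ [' '])) (' ' :: (sentence_lower ++ [' '])) then n + 1 else n) st.2
     ((y, no) : Int × Int))
    = (let tokens : PySem.Set (List Char) :=
         PySem.Set.ofList (PySem.Chars.splitOn (PySem.Chars.lower sentence.toList) [' '])
       (st.1 + PySem.Set.len (PySem.Set.inter pvYesSet tokens),
        st.2 + PySem.Set.len (PySem.Set.inter pvNoSet tokens))) := by
  unfold pvYesSet pvNoSet
  simp only [pv_count_eq pvYesInds (by decide) (by decide),
             pv_count_eq pvNoInds (by decide) (by decide)]

-- ===== VERDICT (by name: the statement is the Claim_ definition above) =====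
theorem format_yes_no_response_spec : Claim_equal_format_yes_no_response := by
  intro sentences entities _ _
  unfold Spec_format_yes_no_response format_yes_no_response format_yes_no_response_alt
  have h : (fun (st : Int × Int) (sentence : String) =>
      let sentence_lower := PySem.Chars.lower sentence.toList
      let y := pvYesInds.foldl (fun n indicator =>
        if PySem.Chars.isIn (' ' :: (indicator ++ [' '])) (' ' :: (sentence_lower ++ [' '])) then n + 1 else n) st.1
      let no := pvNoInds.foldl (fun n indicator =>
        if PySem.Chars.isIn (' ' :: (indicator ++ [' '])) (' ' :: (sentence_lower ++ [' '])) then n + 1 else n) st.2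
      ((y, no) : Int × Int))
      = (fun (st : Int × Int) (sentence : String) =>
      let tokens : PySem.Set (List Char) :=
        PySem.Set.ofList (PySem.Chars.splitOn (PySem.Chars.lower sentence.toList) [' '])
      (st.1 + PySem.Set.len (PySem.Set.inter pvYesSet tokens),
       st.2 + PySem.Set.len (PySem.Set.inter pvNoSet tokens))) := by
    funext st sentence; exact pv_step_eq st sentence
  rw [h]
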